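-- pv_equiv track=rewrite | github.com/Dax246/FIT2004 | Assignment 1/assignment1.py | binary_search_anagram_groups
-- ===== SOURCE A (Python) =====
-- def binary_search_anagram_groups(input_list, target):
--     """
--     Applies binary search to find which sublist matches the target
--     Input is a list of anagrams that are grouped together if they are anagrams of each other and returns the index
--     of the group of anagrams if it matches target else it returns None
--     Based of the psuedocode given on page 2 of the FIT2004 course notes by Daniel Anderson
--     :Complexity = O(M*logn) where n is the length of input_list and M is the length of target
--     """
--     hi = len(input_list)
--     lo = 0
--     # changes lo/hi depending on which side of mid the target should be
--     while lo < hi -1: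
--         mid = (lo+hi)//2
--         if target >= input_list[mid][0][0]:
--             lo = mid
--         else:
--             hi = mid
--     if input_list[lo][0][0] == target:
--         return lo
--     else:
--         return None
-- ===== SOURCE B (Python) =====
-- def binary_search_anagram_groups(input_list, target):
--     """Stage 1: extract the first character of each group's first word into a
--     flat key list. Stage 2: recursive binary search over that key list with
--     explicit bounds, folding the final membership test into the base case."""
--     keys = [group[0][0] for group in input_list]
--
--     def locate(lo, hi):
--         if lo >= hi - 1:
--             return lo if keys[lo] == target else None
--         mid = (lo + hi) // 2
--         return locate(mid, hi) if target >= keys[mid] else locate(lo, mid)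
--
--     return locate(0, len(input_list))
-- ===== Notes on version B (the rewrite author's own statement) =====
-- stated objective: alternative
-- what changed: B first extracts, in one pass, the first character of each group's first word into a flat key list, then runs a recursive binary search with explicit bounds over that key list (base case carries the final equality test), instead of A's while-loop that mutates lo/hi and re-indexes the nested list at every step.
-- outside the precondition, e.g. on binary_search_anagram_groups([['a'], ['b'], []], 'a'): A returns 0, B raises IndexError
import Mathlib
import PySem

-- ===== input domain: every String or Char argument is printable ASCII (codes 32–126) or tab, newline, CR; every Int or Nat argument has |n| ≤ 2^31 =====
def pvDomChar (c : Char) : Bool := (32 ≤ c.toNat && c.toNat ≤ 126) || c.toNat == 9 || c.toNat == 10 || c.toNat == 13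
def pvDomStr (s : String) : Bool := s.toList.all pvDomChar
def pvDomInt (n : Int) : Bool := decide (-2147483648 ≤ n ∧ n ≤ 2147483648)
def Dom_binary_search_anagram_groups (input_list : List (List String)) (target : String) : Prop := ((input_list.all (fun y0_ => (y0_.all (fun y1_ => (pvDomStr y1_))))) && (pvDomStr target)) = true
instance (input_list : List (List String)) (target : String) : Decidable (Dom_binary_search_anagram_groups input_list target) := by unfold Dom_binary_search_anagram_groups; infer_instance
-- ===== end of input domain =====

-- B extracts the first character of every group's first word into a flat key list in one pass,
-- then runs a recursive binary search over that key list; objective: alternative decomposition, not speed.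

-- ===== PORT A =====
-- input_list[i][0][0] as a 1-char string; none = IndexError
def pvCharAt (l : List (List String)) (i : Int) : Option String :=
  (PySem.List.pyGet? l i).bind (fun g =>
    (PySem.List.pyGet? g 0).bind (fun s =>
      (PySem.Str.pyGet? s 0).map (fun c => String.ofList [c])))

-- the while loop of A: mutates lo/hi until lo ≥ hi-1, then returns lo (none = IndexError inside the loop)
def pvALoop (l : List (List String)) (t : String) (lo hi : Int) : Option Int :=
  if _h : lo < hi - 1 then
    -- mid = (lo+hi)//2
    match pvCharAt l (PySem.Int.floordiv (lo + hi) 2) with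
    | none => none
    | some c =>
      if c ≤ t then pvALoop l t (PySem.Int.floordiv (lo + hi) 2) hi
      else pvALoop l t lo (PySem.Int.floordiv (lo + hi) 2)
  else some lo
termination_by (hi - lo).toNat
decreasing_by
  all_goals
    simp only [PySem.Int.floordiv_eq_ediv_of_pos (by norm_num : (0:Int) < 2)]
    omega

def binary_search_anagram_groups (input_list : List (List String)) (target : String) : Option Int :=
  match pvALoop input_list target 0 (PySem.List.len input_list) with
  | none => none          -- loop raised IndexError (outside Pre_)
  | some lo =>
    match pvCharAt input_list lo with
    | none => none        -- final indexing raised IndexError (outside Pre_)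
    | some c => if c = target then some lo else none

-- ===== PORT B =====
-- keys = [group[0][0] for group in input_list]  (defaults only pad the out-of-Pre_ cases where Python B raises)
def pvKeys (l : List (List String)) : List String :=
  l.map (fun g => String.ofList ((g.headD "").toList.take 1))

-- locate(lo, hi): recursive binary search over the flat key list, Nat bounds
def pvLocate (ks : List String) (t : String) (lo hi : Nat) : Option Int :=
  if lo + 1 ≥ hi then
    if ks.getD lo "" = t then some (lo : Int) else none
  else if ks.getD ((lo + hi) / 2) "" ≤ t then pvLocate ks t ((lo + hi) / 2) hi
  else pvLocate ks t lo ((lo + hi) / 2)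
termination_by hi - lo
decreasing_by all_goals omega

def binary_search_anagram_groups_alt (input_list : List (List String)) (target : String) : Option Int :=
  pvLocate (pvKeys input_list) target 0 input_list.length

-- ===== PRECONDITION & SPEC =====
-- Pre_ excludes inputs where A raises IndexError (empty list) and any input containing an empty anagram
-- group or an empty first word: both programs raise IndexError on such a group when they touch it, and
-- WHICH groups A's loop touches is an artefact of its search path (B's key pass touches all of them).
def Pre_binary_search_anagram_groups (input_list : List (List String)) (target : String) : Prop :=
  input_list ≠ [] ∧
  (input_list.all (fun g => !g.isEmpty && !(g.headD "").isEmpty)) = true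
instance (input_list : List (List String)) (target : String) : Decidable (Pre_binary_search_anagram_groups input_list target) := by unfold Pre_binary_search_anagram_groups; infer_instance
def pvWitness_binary_search_anagram_groups : List (List String) × String := ([["ab", "ba"], ["cd"]], "a")

def Spec_binary_search_anagram_groups (input_list : List (List String)) (target : String) (out : Option Int) : Prop := out = binary_search_anagram_groups_alt input_list target
instance (input_list : List (List String)) (target : String) (out : Option Int) : Decidable (Spec_binary_search_anagram_groups input_list target out) := by unfold Spec_binary_search_anagram_groups; infer_instance

-- ===== CLAIM (what is proved, stated in full; the proofs are below) =====
def Claim_equal_binary_search_anagram_groups : Prop := ∀ (input_list : List (List String)) (target : String), Dom_binary_search_anagram_groups input_list target → Pre_binary_search_anagram_groups input_list target → Spec_binary_search_anagram_groups input_list target (binary_search_anagram_groups input_list target)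

-- ===== LEMMAS AND PROOFS =====

-- under Pre_'s shape condition, A's triple indexing at an in-range index yields exactly B's precomputed key
theorem pvCharAt_eq_key (l : List (List String)) (i : Nat)
    (hall : (l.all (fun g => !g.isEmpty && !(g.headD "").isEmpty)) = true)
    (hi : i < l.length) :
    pvCharAt l (i : Int) = some ((pvKeys l).getD i "") := by
  have hg := List.all_eq_true.mp hall l[i] (List.getElem_mem hi)
  simp only [Bool.and_eq_true, Bool.not_eq_true'] at hg
  obtain ⟨hne, hhd⟩ := hg
  cases hG : l[i] with
  | nil => simp [hG] at hne
  | cons s gs =>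
    cases hs : s.toList with
    | nil =>
      exfalso
      rw [hG] at hhd
      rw [String.toList_eq_nil_iff.mp hs] at hhd
      simp only [List.headD_cons] at hhd
      exact absurd hhd (by decide)
    | cons c cs =>
      simp [pvCharAt, pvKeys, hi, hG,
            PySem.Str.pyGet?, PySem.Chars.pyGet?, hs, List.getD_eq_getElem?_getD]

-- A's loop followed by A's final test equals B's recursion, for every in-range pair of bounds
theorem pvALoop_eq_pvLocate (l : List (List String)) (t : String) (lo hi : Nat)
    (hall : (l.all (fun g => !g.isEmpty && !(g.headD "").isEmpty)) = true)
    (hlo : lo < l.length) (hhi : hi ≤ l.length) :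
    (match pvALoop l t (lo : Int) (hi : Int) with
     | none => none
     | some lo' =>
       match pvCharAt l lo' with
       | none => none
       | some c => if c = t then some lo' else none) = pvLocate (pvKeys l) t lo hi := by
  by_cases h : lo + 1 < hi
  · have hcast : (lo : Int) < (hi : Int) - 1 := by omega
    have hmid : PySem.Int.floordiv ((lo : Int) + (hi : Int)) 2 = (((lo + hi) / 2 : Nat) : Int) := by
      have := PySem.Int.floordiv_natCast (lo + hi) 2
      push_cast at this ⊢
      exact this
    have hmlt : (lo + hi) / 2 < l.length := by omega
    rw [pvALoop, dif_pos hcast, pvLocate, if_neg (by omega), hmid,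
        pvCharAt_eq_key l ((lo + hi) / 2) hall hmlt]
    simp only
    by_cases hle : (pvKeys l).getD ((lo + hi) / 2) "" ≤ t
    · rw [if_pos hle, if_pos hle]
      exact pvALoop_eq_pvLocate l t ((lo + hi) / 2) hi hall hmlt hhi
    · rw [if_neg hle, if_neg hle]
      exact pvALoop_eq_pvLocate l t lo ((lo + hi) / 2) hall hlo (by omega)
  · have hcast : ¬ (lo : Int) < (hi : Int) - 1 := by omega
    rw [pvALoop, dif_neg hcast, pvLocate, if_pos (by omega)]
    simp [pvCharAt_eq_key l lo hall hlo]
termination_by hi - lo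
decreasing_by all_goals omega

-- ===== VERDICT (by name: the statement is the Claim_ definition above) =====
theorem binary_search_anagram_groups_spec : Claim_equal_binary_search_anagram_groups := by
  intro input_list target _hdom hpre
  unfold Spec_binary_search_anagram_groups binary_search_anagram_groups binary_search_anagram_groups_alt
  have hne : 0 < input_list.length := List.length_pos_of_ne_nil hpre.1
  have := pvALoop_eq_pvLocate input_list target 0 input_list.length hpre.2 hne le_rfl
  simpa [PySem.List.len] using this
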